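-- pv_equiv track=rewrite | github.com/15025639392/xiao_yan | tools/skills/project-simplifier/scripts/analyze_ui_api_flow.py | walk_reachable
-- ===== SOURCE A (Python) =====
-- from collections import defaultdict, deque
--
-- def walk_reachable(start: str, graph: dict[str, list[str]]) -> list[str]:
--     visited: set[str] = set()
--     queue: deque[str] = deque([start])
--     while queue:
--         current = queue.popleft()
--         if current in visited:
--             continue
--         visited.add(current)
--         for next_item in graph.get(current, []):
--             if next_item not in visited:
--                 queue.append(next_item)
--     return sorted(visited)
-- ===== SOURCE B (Python) =====
-- def walk_reachable(start: str, graph: dict[str, list[str]]) -> list[str]: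
--     reachable = {start}
--     frontier = {start}
--     while frontier:
--         next_frontier = set()
--         for node in frontier:
--             for neighbor in graph.get(node, []):
--                 if neighbor not in reachable:
--                     reachable.add(neighbor)
--                     next_frontier.add(neighbor)
--         frontier = next_frontier
--     return sorted(reachable)
-- ===== Notes on version B (the rewrite author's own statement) =====
-- stated objective: alternative
-- what changed: Replaces the one-node-at-a-time FIFO deque (which may enqueue the same node several times and re-pops visited nodes) with set-based breadth-first wavefront expansion: a frontier set is expanded wholesale into a next-frontier of genuinely new nodes each round, so no node is ever enqueued or examined twice.
import Mathlib
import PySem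

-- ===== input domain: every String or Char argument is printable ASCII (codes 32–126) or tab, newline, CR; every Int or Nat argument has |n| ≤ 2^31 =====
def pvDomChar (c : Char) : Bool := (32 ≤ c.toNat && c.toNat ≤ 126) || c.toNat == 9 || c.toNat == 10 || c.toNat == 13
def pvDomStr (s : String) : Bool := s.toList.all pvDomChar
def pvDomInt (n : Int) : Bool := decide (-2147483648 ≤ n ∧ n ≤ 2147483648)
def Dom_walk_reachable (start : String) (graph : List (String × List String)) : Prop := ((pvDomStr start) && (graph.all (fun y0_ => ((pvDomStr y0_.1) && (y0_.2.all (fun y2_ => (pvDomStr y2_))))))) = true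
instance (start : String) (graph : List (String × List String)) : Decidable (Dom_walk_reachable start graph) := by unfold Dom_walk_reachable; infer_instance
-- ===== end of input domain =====

-- B replaces A's one-node-at-a-time FIFO deque with set-based breadth-first wavefront
-- expansion (frontier / next-frontier rounds); the sorted result is identical.
-- Both ports use 'graph.get(node, [])':
def pvAdj (graph : List (String × List String)) (v : String) : List String :=
  PySem.Dict.getD ⟨graph⟩ v []

-- pvUniv collects every string that can ever enter a queue/frontier; it only bounds the
-- well-founded recursion of the loops and does not influence the computed value.
def pvUniv (start : String) (graph : List (String × List String)) : List String :=
  start :: graph.flatMap Prod.snd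

theorem pvAdj_subset (graph : List (String × List String)) (v x : String)
    (hx : x ∈ pvAdj graph v) : x ∈ graph.flatMap Prod.snd := by
  unfold pvAdj PySem.Dict.getD PySem.Dict.get? at hx
  cases hfind : List.find? (fun p => p.1 == v) graph with
  | none => simp [hfind] at hx
  | some p =>
    simp [hfind] at hx
    exact List.mem_flatMap.mpr ⟨p, List.mem_of_find?_eq_some hfind, hx⟩

theorem pv_nodup_length_le (l l' : List String) (h : l.Nodup) (hs : ∀ x ∈ l, x ∈ l') :
    l.length ≤ l'.dedup.length := by
  have h1 : l.toFinset.card = l.length := List.toFinset_card_of_nodup h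
  have h2 : l.toFinset ⊆ l'.toFinset := by intro x hx; simp at hx ⊢; exact hs x hx
  have h3 := Finset.card_le_card h2
  have h4 : l'.toFinset.card = l'.dedup.length := by rw [← List.card_toFinset]
  omega

-- ===== PORT A =====
-- A's while loop: pop the queue's head; skip if visited; otherwise mark visited and
-- append the not-yet-visited neighbours.  The two Prop arguments only justify termination.
def walkLoopA (graph : List (String × List String)) (U : List String)
    (visited : PySem.Set String) (queue : List String)
    (hv : visited.Nodup ∧ ∀ x ∈ visited, x ∈ U)
    (hq : ∀ x ∈ queue, x ∈ U)
    (hU : ∀ x ∈ graph.flatMap Prod.snd, x ∈ U) : List String :=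
  match queue with
  | [] => PySem.List.sorted visited (fun x => x)
  | current :: rest =>
    if hc : current ∈ visited then
      walkLoopA graph U visited rest hv (fun x hx => hq x (List.mem_cons_of_mem _ hx)) hU
    else
      walkLoopA graph U (PySem.Set.add visited current)
        (rest ++ (pvAdj graph current).filter
          (fun n => !(PySem.Set.contains (PySem.Set.add visited current) n)))
        ⟨PySem.Set.nodup_add visited current hv.1, by
          intro x hx
          rcases (PySem.Set.mem_add visited current x).mp hx with h | h
          · exact hv.2 x h
          · exact h ▸ hq current List.mem_cons_self⟩
        (by
          intro x hx
          rcases List.mem_append.mp hx with h | h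
          · exact hq x (List.mem_cons_of_mem _ h)
          · exact hU x (pvAdj_subset graph current x (List.mem_of_mem_filter h)))
        hU
  termination_by (U.dedup.length + 1 - visited.length, queue.length)
  decreasing_by
  · exact Prod.Lex.right _ (by simp)
  · apply Prod.Lex.left
    rw [PySem.Set.add_of_not_mem hc]
    have := pv_nodup_length_le visited U hv.1 hv.2
    simp only [List.length_append, List.length_cons, List.length_nil]
    omega

def walk_reachable (start : String) (graph : List (String × List String)) : List String :=
  walkLoopA graph (pvUniv start graph) [] [start]
    ⟨List.nodup_nil, by intro x hx; simp at hx⟩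
    (by intro x hx; simp at hx; simp [pvUniv, hx])
    (fun x hx => List.mem_cons_of_mem _ hx)

-- ===== PORT B =====
-- B's inner two loops: expand every node of the frontier, adding each unseen neighbour
-- to both the reachable set and the next frontier.
def expandNode (graph : List (String × List String))
    (acc : PySem.Set String × PySem.Set String) (node : String) :
    PySem.Set String × PySem.Set String :=
  (pvAdj graph node).foldl
    (fun acc2 n =>
      if PySem.Set.contains acc2.1 n then acc2
      else (PySem.Set.add acc2.1 n, PySem.Set.add acc2.2 n)) acc

def expandWave (graph : List (String × List String)) (frontier : List String)
    (reachable : PySem.Set String) : PySem.Set String × PySem.Set String :=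
  frontier.foldl (expandNode graph) (reachable, PySem.Set.empty)

-- fold invariants of one wavefront expansion (also needed for B's termination)
theorem expandNode_inv (r0 : List String) :
    ∀ (l : List String) (acc : PySem.Set String × PySem.Set String),
    acc.1.Nodup → acc.1 = r0 ++ acc.2 →
    (let res := l.foldl
        (fun acc2 n =>
          if PySem.Set.contains acc2.1 n then acc2
          else (PySem.Set.add acc2.1 n, PySem.Set.add acc2.2 n)) acc
     res.1.Nodup ∧ res.1 = r0 ++ res.2 ∧
     (∀ x ∈ res.2, x ∈ acc.2 ∨ x ∈ l) ∧
     (∀ n ∈ l, n ∈ res.1) ∧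
     (∀ x ∈ acc.1, x ∈ res.1)) := by
  intro l
  induction l with
  | nil => intro acc h1 h2; exact ⟨h1, h2, fun x hx => Or.inl hx, by simp, fun x hx => hx⟩
  | cons n t ih =>
    intro acc h1 h2
    simp only [List.foldl_cons]
    by_cases hn : n ∈ acc.1
    · rw [if_pos ((PySem.Set.contains_iff acc.1 n).mpr hn)]
      obtain ⟨a1, a2, a3, a4, a5⟩ := ih acc h1 h2
      exact ⟨a1, a2, fun x hx => (a3 x hx).imp id (List.mem_cons_of_mem _),
        fun m hm => by
          rcases List.mem_cons.mp hm with h | h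
          · exact h ▸ a5 n hn
          · exact a4 m h,
        a5⟩
    · rw [if_neg (by simp [hn])]
      have hn2 : n ∉ acc.2 := fun h => hn (h2 ▸ List.mem_append_right _ h)
      have e1 : PySem.Set.add acc.1 n = acc.1 ++ [n] := PySem.Set.add_of_not_mem hn
      have e2 : PySem.Set.add acc.2 n = acc.2 ++ [n] := PySem.Set.add_of_not_mem hn2
      obtain ⟨a1, a2, a3, a4, a5⟩ := ih (PySem.Set.add acc.1 n, PySem.Set.add acc.2 n)
        (PySem.Set.nodup_add acc.1 n h1) (by rw [e1, e2, h2, List.append_assoc])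
      refine ⟨a1, a2, fun x hx => ?_, fun m hm => ?_, fun x hx => ?_⟩
      · rcases a3 x hx with h | h
        · rw [e2] at h
          rcases List.mem_append.mp h with h | h
          · exact Or.inl h
          · simp at h; exact Or.inr (h ▸ List.mem_cons_self)
        · exact Or.inr (List.mem_cons_of_mem _ h)
      · rcases List.mem_cons.mp hm with h | h
        · exact h ▸ a5 n (by simp [e1])
        · exact a4 m h
      · exact a5 x (by simp [e1, hx])

theorem expandWave_inv (graph : List (String × List String)) (r0 : List String) :
    ∀ (frontier : List String) (acc : PySem.Set String × PySem.Set String),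
    acc.1.Nodup → acc.1 = r0 ++ acc.2 →
    (let res := frontier.foldl (expandNode graph) acc
     res.1.Nodup ∧ res.1 = r0 ++ res.2 ∧
     (∀ x ∈ res.2, x ∈ acc.2 ∨ ∃ v ∈ frontier, x ∈ pvAdj graph v) ∧
     (∀ v ∈ frontier, ∀ n ∈ pvAdj graph v, n ∈ res.1) ∧
     (∀ x ∈ acc.1, x ∈ res.1)) := by
  intro frontier
  induction frontier with
  | nil => intro acc h1 h2; exact ⟨h1, h2, fun x hx => Or.inl hx, by simp, fun x hx => hx⟩
  | cons v t ih =>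
    intro acc h1 h2
    simp only [List.foldl_cons]
    obtain ⟨b1, b2, b3, b4, b5⟩ := expandNode_inv r0 (pvAdj graph v) acc h1 h2
    obtain ⟨a1, a2, a3, a4, a5⟩ := ih (expandNode graph acc v) b1 b2
    refine ⟨a1, a2, fun x hx => ?_, fun u hu m hm => ?_, fun x hx => a5 x (b5 x hx)⟩
    · rcases a3 x hx with h | h
      · rcases b3 x h with h' | h'
        · exact Or.inl h'
        · exact Or.inr ⟨v, List.mem_cons_self, h'⟩
      · exact Or.inr (h.imp fun u hu => ⟨List.mem_cons_of_mem _ hu.1, hu.2⟩)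
    · rcases List.mem_cons.mp hu with h | h
      · exact a5 m (b4 m (h ▸ hm))
      · exact a4 u h m hm

theorem expandWave_spec (graph : List (String × List String))
    (reachable : PySem.Set String) (frontier : List String) (h1 : reachable.Nodup) :
    (expandWave graph frontier reachable).1.Nodup ∧
    (expandWave graph frontier reachable).1 = reachable ++ (expandWave graph frontier reachable).2 ∧
    (∀ x ∈ (expandWave graph frontier reachable).2, ∃ v ∈ frontier, x ∈ pvAdj graph v) ∧
    (∀ v ∈ frontier, ∀ n ∈ pvAdj graph v, n ∈ (expandWave graph frontier reachable).1) ∧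
    (∀ x ∈ reachable, x ∈ (expandWave graph frontier reachable).1) := by
  unfold expandWave
  obtain ⟨a1, a2, a3, a4, a5⟩ :=
    expandWave_inv graph reachable frontier (reachable, PySem.Set.empty) h1 (by simp [PySem.Set.empty])
  refine ⟨a1, a2, fun x hx => ?_, a4, a5⟩
  rcases a3 x hx with h | h
  · simp [PySem.Set.empty] at h
  · exact h

-- B's while loop: expand the whole frontier into (reachable', next_frontier).
def walkLoopB (graph : List (String × List String)) (U : List String)
    (reachable : PySem.Set String) (frontier : List String)
    (hr : reachable.Nodup ∧ ∀ x ∈ reachable, x ∈ U)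
    (hU : ∀ x, x ∈ graph.flatMap Prod.snd → x ∈ U) : List String :=
  match frontier with
  | [] => PySem.List.sorted reachable (fun x => x)
  | f :: fs =>
    walkLoopB graph U (expandWave graph (f :: fs) reachable).1
      (expandWave graph (f :: fs) reachable).2
      (by
        obtain ⟨a1, a2, a3, _, _⟩ := expandWave_spec graph reachable (f :: fs) hr.1
        refine ⟨a1, ?_⟩
        intro x hx
        rw [a2] at hx
        rcases List.mem_append.mp hx with h | h
        · exact hr.2 x h
        · obtain ⟨v, _, hv⟩ := a3 x h
          exact hU x (pvAdj_subset graph v x hv))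
      hU
  termination_by (U.dedup.length + 1 - reachable.length, frontier.length)
  decreasing_by
    obtain ⟨a1, a2, a3, _, _⟩ := expandWave_spec graph reachable (f :: fs) hr.1
    by_cases hnf : (expandWave graph (f :: fs) reachable).2 = []
    · have : (expandWave graph (f :: fs) reachable).1 = reachable := by rw [a2, hnf]; simp
      rw [this, hnf]
      exact Prod.Lex.right _ (by simp)
    · apply Prod.Lex.left
      have hlen : (expandWave graph (f :: fs) reachable).1.length ≤ U.dedup.length := by
        apply pv_nodup_length_le _ _ a1
        intro x hx
        rw [a2] at hx
        rcases List.mem_append.mp hx with h | h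
        · exact hr.2 x h
        · obtain ⟨v, _, hv⟩ := a3 x h
          exact hU x (pvAdj_subset graph v x hv)
      have hgt : reachable.length < (expandWave graph (f :: fs) reachable).1.length := by
        rw [a2, List.length_append]
        have : 0 < (expandWave graph (f :: fs) reachable).2.length := List.length_pos_iff.mpr hnf
        omega
      omega

def walk_reachable_alt (start : String) (graph : List (String × List String)) : List String :=
  walkLoopB graph (pvUniv start graph) (PySem.Set.ofList [start]) [start]
    ⟨PySem.Set.nodup_ofList [start], by
      intro x hx
      have := (PySem.Set.mem_ofList [start] x).mp hx
      simp at this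
      simp [pvUniv, this]⟩
    (fun x hx => List.mem_cons_of_mem _ hx)

-- ===== PRECONDITION & SPEC =====
def Spec_walk_reachable (start : String) (graph : List (String × List String)) (out : List String) : Prop := out = walk_reachable_alt start graph
instance (start : String) (graph : List (String × List String)) (out : List String) : Decidable (Spec_walk_reachable start graph out) := by unfold Spec_walk_reachable; infer_instance

-- ===== CLAIM (what is proved, stated in full; the proofs are below) =====
def Claim_equal_walk_reachable : Prop := ∀ (start : String) (graph : List (String × List String)), Dom_walk_reachable start graph → Spec_walk_reachable start graph (walk_reachable start graph)

-- ===== LEMMAS AND PROOFS =====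

-- reachability in the graph: the set both programs compute (then sort)
inductive Reach (start : String) (graph : List (String × List String)) : String → Prop
  | start : Reach start graph start
  | step {u v : String} : Reach start graph u → v ∈ pvAdj graph u → Reach start graph v

theorem walkLoopA_spec (start : String) (graph : List (String × List String)) (U : List String) :
    ∀ (visited : PySem.Set String) (queue : List String) hv hq hU,
    (∀ x ∈ visited, Reach start graph x) →
    (∀ x ∈ queue, Reach start graph x) →
    (∀ v ∈ visited, ∀ n ∈ pvAdj graph v, n ∈ visited ∨ n ∈ queue) →
    (start ∈ visited ∨ start ∈ queue) →
    ∃ S : List String, walkLoopA graph U visited queue hv hq hU = PySem.List.sorted S (fun x => x) ∧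
      S.Nodup ∧ ∀ x, x ∈ S ↔ Reach start graph x := by
  intro visited queue hv hq hU
  induction visited, queue, hv, hq using walkLoopA.induct graph U hU with
  | case1 visited hv hq _ =>
    intro hRv _ hcl hst
    refine ⟨visited, by rw [walkLoopA], hv.1, fun x => ⟨hRv x, ?_⟩⟩
    intro hr
    induction hr with
    | start =>
      rcases hst with h | h
      · exact h
      · simp at h
    | step hu hm ih =>
      rcases hcl _ ih _ hm with h | h
      · exact h
      · simp at h
  | case2 visited hv current rest hq hc _ ih =>
    intro hRv hRq hcl hst
    obtain ⟨S, e, hn, hm⟩ := ih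
      hRv
      (fun x hx => hRq x (List.mem_cons_of_mem _ hx))
      (by
        intro v hvv n hnn
        rcases hcl v hvv n hnn with h | h
        · exact Or.inl h
        · rcases List.mem_cons.mp h with h' | h'
          · exact Or.inl (h' ▸ hc)
          · exact Or.inr h')
      (by
        rcases hst with h | h
        · exact Or.inl h
        · rcases List.mem_cons.mp h with h' | h'
          · exact Or.inl (h' ▸ hc)
          · exact Or.inr h')
    refine ⟨S, ?_, hn, hm⟩
    rw [walkLoopA, dif_pos hc]
    exact e
  | case3 visited hv current rest hq hc _ ih =>
    intro hRv hRq hcl hst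
    have hcur : Reach start graph current := hRq current List.mem_cons_self
    have hmemadd : ∀ x, x ∈ visited.add current ↔ x ∈ visited ∨ x = current :=
      fun x => PySem.Set.mem_add visited current x
    have hfiltmem : ∀ n, n ∈ pvAdj graph current → n ∉ visited.add current →
        n ∈ List.filter (fun n => !(visited.add current).contains n) (pvAdj graph current) := by
      intro n h1 h2
      refine List.mem_filter.mpr ⟨h1, ?_⟩
      simp [h2]
    obtain ⟨S, e, hn, hm⟩ := ih
      (by
        intro x hx
        rcases (hmemadd x).mp hx with h | h
        · exact hRv x h
        · exact h ▸ hcur)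
      (by
        intro x hx
        rcases List.mem_append.mp hx with h | h
        · exact hRq x (List.mem_cons_of_mem _ h)
        · exact Reach.step hcur (List.mem_of_mem_filter h))
      (by
        intro v hvv n hnn
        rcases (hmemadd v).mp hvv with h | h
        · rcases hcl v h n hnn with h' | h'
          · exact Or.inl ((hmemadd n).mpr (Or.inl h'))
          · rcases List.mem_cons.mp h' with h'' | h''
            · exact Or.inl ((hmemadd n).mpr (Or.inr h''))
            · exact Or.inr (List.mem_append_left _ h'')
        · by_cases hn2 : n ∈ visited.add current
          · exact Or.inl hn2
          · exact Or.inr (List.mem_append_right _ (hfiltmem n (h ▸ hnn) hn2)))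
      (by
        rcases hst with h | h
        · exact Or.inl ((hmemadd start).mpr (Or.inl h))
        · rcases List.mem_cons.mp h with h' | h'
          · exact Or.inl ((hmemadd start).mpr (Or.inr h'))
          · exact Or.inr (List.mem_append_left _ h'))
    refine ⟨S, ?_, hn, hm⟩
    rw [walkLoopA, dif_neg hc]
    exact e

theorem walkLoopB_spec (start : String) (graph : List (String × List String)) (U : List String) :
    ∀ (reachable : PySem.Set String) (frontier : List String) hr hU,
    (∀ x ∈ reachable, Reach start graph x) →
    (∀ x ∈ frontier, x ∈ reachable) →
    start ∈ reachable →
    (∀ v ∈ reachable, v ∉ frontier → ∀ n ∈ pvAdj graph v, n ∈ reachable) →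
    ∃ S : List String, walkLoopB graph U reachable frontier hr hU = PySem.List.sorted S (fun x => x) ∧
      S.Nodup ∧ ∀ x, x ∈ S ↔ Reach start graph x := by
  intro reachable frontier hr hU
  induction reachable, frontier, hr using walkLoopB.induct graph U hU with
  | case1 reachable hr =>
    intro hR _ hst hcl
    refine ⟨reachable, by rw [walkLoopB], hr.1, fun x => ⟨hR x, ?_⟩⟩
    intro hreach
    induction hreach with
    | start => exact hst
    | step hu hm ih => exact hcl _ ih (by simp) _ hm
  | case2 reachable hr f fs ih =>
    intro hR hsub hst hcl
    obtain ⟨a1, a2, a3, a4, a5⟩ := expandWave_spec graph reachable (f :: fs) hr.1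
    obtain ⟨S, e, hn, hm⟩ := ih
      (by
        intro x hx
        rw [a2] at hx
        rcases List.mem_append.mp hx with h | h
        · exact hR x h
        · obtain ⟨v, hvf, hva⟩ := a3 x h
          exact Reach.step (hR v (hsub v hvf)) hva)
      (by
        intro x hx
        rw [a2]
        exact List.mem_append_right _ hx)
      (a5 start hst)
      (by
        intro v hvv hnf n hnn
        rw [a2] at hvv
        rcases List.mem_append.mp hvv with h | h
        · by_cases hvf : v ∈ f :: fs
          · exact a4 v hvf n hnn
          · exact a5 n (hcl v h hvf n hnn)
        · exact absurd h hnf)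
    refine ⟨S, ?_, hn, hm⟩
    rw [walkLoopB]
    exact e

-- ===== VERDICT (by name: the statement is the Claim_ definition above) =====
theorem walk_reachable_spec : Claim_equal_walk_reachable := by
  intro start graph _
  unfold Spec_walk_reachable walk_reachable walk_reachable_alt
  obtain ⟨S1, e1, n1, m1⟩ := walkLoopA_spec start graph (pvUniv start graph) [] [start] _ _ _
    (by intro x hx; simp at hx)
    (by intro x hx; simp at hx; exact hx ▸ Reach.start)
    (by intro v hv; simp at hv)
    (Or.inr List.mem_cons_self)
  obtain ⟨S2, e2, n2, m2⟩ := walkLoopB_spec start graph (pvUniv start graph)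
    (PySem.Set.ofList [start]) [start] _ _
    (by intro x hx
        have := (PySem.Set.mem_ofList [start] x).mp hx
        simp at this; exact this ▸ Reach.start)
    (by intro x hx; simp at hx; exact hx ▸ (PySem.Set.mem_ofList [start] start).mpr (by simp))
    ((PySem.Set.mem_ofList [start] start).mpr (by simp))
    (by intro v hv hnv
        have := (PySem.Set.mem_ofList [start] v).mp hv
        simp at this
        exact absurd (this ▸ List.mem_cons_self) hnv)
  rw [e1, e2]
  apply PySem.List.sorted_eq_sorted_of_perm _ _ _ (fun a b h => h)
  rw [List.perm_ext_iff_of_nodup n1 n2]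
  intro a
  rw [m1 a, m2 a]
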